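-- pv_equiv track=rewrite | github.com/GURoff/StreamWebcamVideo-API | lib/circle_division.py | recognize_value
-- ===== SOURCE A (Python) =====
-- def recognize_value(angle):
--     # Шкала значений на барометре (в градусах)
--     scale_values = {
--         (-90, -45): 'Stormy',
--         (-45, 45): 'Normal',
--         (45, 90): 'Sunny'
--     }
--
--     # Определяем значение на основе угла
--     for (min_angle, max_angle), value in scale_values.items():
--         if min_angle <= angle <= max_angle:
--             return value
--
--     return 'Unknown'
-- ===== SOURCE B (Python) =====
-- def recognize_value(angle):
--     if angle < -90 or 90 < angle:
--         return 'Unknown'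
--     # count the interior thresholds strictly below the angle to index the label table
--     return ('Stormy', 'Normal', 'Sunny')[(angle > -45) + (angle > 45)]
-- ===== Notes on version B (the rewrite author's own statement) =====
-- stated objective: alternative
-- what changed: Replaced the dict table and the linear scan over its (range, label) items by one out-of-range check plus a branchless arithmetic index (count of interior thresholds strictly below the angle) into a label tuple.
import Mathlib
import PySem

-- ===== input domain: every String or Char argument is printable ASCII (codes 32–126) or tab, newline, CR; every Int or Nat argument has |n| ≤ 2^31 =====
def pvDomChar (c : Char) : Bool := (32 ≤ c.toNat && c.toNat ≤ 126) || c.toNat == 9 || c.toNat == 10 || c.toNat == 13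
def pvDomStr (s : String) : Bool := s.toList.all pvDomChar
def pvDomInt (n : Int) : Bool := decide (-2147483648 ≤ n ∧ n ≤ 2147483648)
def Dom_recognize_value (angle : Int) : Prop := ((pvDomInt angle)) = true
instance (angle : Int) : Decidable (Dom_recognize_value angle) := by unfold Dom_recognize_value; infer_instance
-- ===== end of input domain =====

-- B replaces A's dict-table scan by a range check plus an arithmetic index into a label tuple (return value only).

-- ===== PORT A =====
-- A's dict in insertion order, scanned front to back, first matching range wins.
def recognize_value_scale : List ((Int × Int) × String) :=
  [((-90, -45), "Stormy"), ((-45, 45), "Normal"), ((45, 90), "Sunny")]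

def recognize_value_loop (angle : Int) : List ((Int × Int) × String) → String
  | [] => "Unknown"
  | ((mn, mx), v) :: rest =>
      if mn ≤ angle ∧ angle ≤ mx then v else recognize_value_loop angle rest

def recognize_value (angle : Int) : String :=
  recognize_value_loop angle recognize_value_scale

-- ===== PORT B =====
def recognize_value_alt (angle : Int) : String :=
  if angle < -90 ∨ 90 < angle then "Unknown"
  else
    -- tuple indexing; the index (count of thresholds strictly below angle) is always 0, 1 or 2
    (PySem.List.pyGet? ["Stormy", "Normal", "Sunny"]
      ((if angle > -45 then 1 else 0) + (if angle > 45 then 1 else 0))).getD ""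

-- ===== PRECONDITION & SPEC =====
def Spec_recognize_value (angle : Int) (out : String) : Prop := out = recognize_value_alt angle
instance (angle : Int) (out : String) : Decidable (Spec_recognize_value angle out) := by unfold Spec_recognize_value; infer_instance

-- ===== CLAIM (what is proved, stated in full; the proofs are below) =====
def Claim_equal_recognize_value : Prop := ∀ (angle : Int), Dom_recognize_value angle → Spec_recognize_value angle (recognize_value angle)

-- ===== LEMMAS AND PROOFS =====

-- ===== VERDICT (by name: the statement is the Claim_ definition above) =====
theorem recognize_value_spec : Claim_equal_recognize_value := by
  intro angle _
  unfold Spec_recognize_value recognize_value recognize_value_scale recognize_value_alt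
  simp only [recognize_value_loop]
  split_ifs <;> first | rfl | (exfalso; omega)
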